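-- pv_equiv track=rewrite | github.com/dsweet99/dryer | tests/benchmark_data/module_010.py | compute_10_15
-- ===== SOURCE A (Python) =====
-- def compute_10_15(a, b, c):
--     x = a * 216 + b * 237
--     y = c * 188 - a * 239
--     for i in range(10):
--         x = x + i * 46
--         y = y - i * 41
--         if x > 6150:
--             x = x % 1575
--     return x + y + 151
-- ===== SOURCE B (Python) =====
-- def compute_10_15(a, b, c):
--     # The mod branch can fire at most once: after x %= 1575 we have x < 1575,
--     # and the remaining increments total < 2070, so x stays below 6150.
--     # Prefix of increments through step i is 46*(0+1+...+i) = 23*i*(i+1);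
--     # all increments sum to 2070; the y-loop totals 41*45 = 1845.
--     x0 = a * 216 + b * 237
--     y = c * 188 - a * 239 - 1845
--     k = next((i for i in range(10) if x0 + 23 * i * (i + 1) > 6150), None)
--     if k is None:
--         x = x0 + 2070
--     else:
--         x = (x0 + 23 * k * (k + 1)) % 1575 + (2070 - 23 * k * (k + 1))
--     return x + y + 151
-- ===== Notes on version B (the rewrite author's own statement) =====
-- stated objective: alternative
-- what changed: B replaces the 10-step dual-accumulator loop with arithmetic: y is the closed form c*188 - a*239 - 1845, and for x it finds the single step k at which the prefix sum x0 + 23*k*(k+1) first exceeds 6150 (the modulo can fire at most once, since afterwards x < 1575 + 2070 < 6150), applying one modulo and closed-form sums for the rest.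
import Mathlib
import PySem

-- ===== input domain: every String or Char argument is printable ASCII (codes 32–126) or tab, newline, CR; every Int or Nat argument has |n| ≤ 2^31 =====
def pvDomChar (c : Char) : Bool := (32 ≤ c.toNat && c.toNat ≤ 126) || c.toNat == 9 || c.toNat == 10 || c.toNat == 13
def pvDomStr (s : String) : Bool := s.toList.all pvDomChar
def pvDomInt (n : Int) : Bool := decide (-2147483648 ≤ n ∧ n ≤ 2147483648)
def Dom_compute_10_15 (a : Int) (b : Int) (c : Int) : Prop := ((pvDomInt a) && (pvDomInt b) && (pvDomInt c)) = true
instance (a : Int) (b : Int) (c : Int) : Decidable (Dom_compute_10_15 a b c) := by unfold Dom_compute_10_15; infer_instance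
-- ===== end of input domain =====

-- B replaces the 10-step dual-accumulator loop by arithmetic: closed-form y and a first-crossing
-- search for the single step at which x's modulo branch can fire; objective: alternative.


-- ===== PORT A =====
-- literal transliteration of A: foldl over range(10) threading both accumulators (x, y)
def compute_10_15 (a : Int) (b : Int) (c : Int) : Int :=
  let x := a * 216 + b * 237
  let y := c * 188 - a * 239
  let st := (PySem.List.pyRange 0 10 1).foldl (fun (st : Int × Int) i =>
    let x := st.1 + i * 46
    let y := st.2 - i * 41
    let x := if x > 6150 then PySem.Int.mod x 1575 else x
    (x, y)) (x, y)
  st.1 + st.2 + 151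

-- ===== PORT B =====
-- B: closed-form y; x via the first index k with x0 + 23*k*(k+1) > 6150 (next(...) → List.find?)
def compute_10_15_alt (a : Int) (b : Int) (c : Int) : Int :=
  let x0 := a * 216 + b * 237
  let y := c * 188 - a * 239 - 1845
  let k := (PySem.List.pyRange 0 10 1).find? (fun i => x0 + 23 * i * (i + 1) > 6150)
  let x := match k with
    | none => x0 + 2070
    | some k => PySem.Int.mod (x0 + 23 * k * (k + 1)) 1575 + (2070 - 23 * k * (k + 1))
  x + y + 151

-- ===== PRECONDITION & SPEC =====
def Spec_compute_10_15 (a : Int) (b : Int) (c : Int) (out : Int) : Prop := out = compute_10_15_alt a b c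
instance (a : Int) (b : Int) (c : Int) (out : Int) : Decidable (Spec_compute_10_15 a b c out) := by unfold Spec_compute_10_15; infer_instance

-- ===== CLAIM =====
def Claim_equal_compute_10_15 : Prop := ∀ (a : Int) (b : Int) (c : Int), Dom_compute_10_15 a b c → Spec_compute_10_15 a b c (compute_10_15 a b c)

-- ===== LEMMAS AND PROOFS =====
def pvStep (x i : Int) : Int :=
  if x + i * 46 > 6150 then PySem.Int.mod (x + i * 46) 1575 else x + i * 46

theorem pv_no_mod (l : List Int) (hl : ∀ i ∈ l, 0 ≤ i) :
    ∀ x : Int, x + 46 * l.sum ≤ 6150 → l.foldl pvStep x = x + 46 * l.sum := by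
  induction l with
  | nil => intro x hx; simp
  | cons i l ih =>
    intro x hx
    have hi : 0 ≤ i := hl i (by simp)
    have hl' : ∀ j ∈ l, 0 ≤ j := fun j hj => hl j (by simp [hj])
    have hs : 0 ≤ l.sum := List.sum_nonneg hl'
    simp only [List.sum_cons] at hx ⊢
    have hc : ¬ (x + i * 46 > 6150) := by omega
    rw [List.foldl_cons, show pvStep x i = x + i * 46 from by unfold pvStep; rw [if_neg hc],
        ih hl' (x + i * 46) (by omega)]
    ring

theorem pv_pairfold (l : List Int) (x y : Int) :
    l.foldl (fun (st : Int × Int) i =>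
      let x := st.1 + i * 46
      let y := st.2 - i * 41
      let x := if x > 6150 then PySem.Int.mod x 1575 else x
      (x, y)) (x, y) = (l.foldl pvStep x, y - 41 * l.sum) := by
  induction l generalizing x y with
  | nil => simp
  | cons i l ih =>
    simp only [List.foldl_cons, List.sum_cons]
    rw [ih, Prod.mk.injEq]
    refine ⟨by rw [show pvStep x i = if x + i * 46 > 6150 then PySem.Int.mod (x + i * 46) 1575 else x + i * 46 from rfl], by ring⟩


-- ===== VERDICT =====
theorem compute_10_15_spec : Claim_equal_compute_10_15 := by
  intro a b c _
  unfold Spec_compute_10_15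
  unfold compute_10_15 compute_10_15_alt
  have hr : PySem.List.pyRange 0 10 1 = [0,1,2,3,4,5,6,7,8,9] := by decide
  simp only [hr]
  rw [pv_pairfold]
  set x0 : Int := a * 216 + b * 237 with hx0
  by_cases h0 : x0 > 6150
  · rw [show (([0,1,2,3,4,5,6,7,8,9]) : List Int) = (0:Int) :: [1,2,3,4,5,6,7,8,9] from rfl,
        List.foldl_cons,
        show pvStep x0 0 = PySem.Int.mod (x0 + 0 * 46) 1575 from by
          unfold pvStep; rw [if_pos (by omega)],
        PySem.Int.mod_eq_emod_of_pos (by norm_num : (0:Int) < 1575),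
        pv_no_mod [1,2,3,4,5,6,7,8,9] (by decide) _ (by norm_num; omega)]
    norm_num [List.find?, h0]
  by_cases h1 : x0 + 46 > 6150
  · rw [show (([0,1,2,3,4,5,6,7,8,9] : List Int)) = ([0] : List Int) ++ (1:Int) :: [2,3,4,5,6,7,8,9] from rfl,
        List.foldl_append,
        pv_no_mod [0] (by decide) x0 (by norm_num; omega),
        show (46:Int) * (([0] : List Int)).sum = 0 from by norm_num,
        List.foldl_cons,
        show pvStep (x0 + 0) 1 = PySem.Int.mod (x0 + 0 + 1 * 46) 1575 from by
        unfold pvStep; rw [if_pos (by omega)],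
        PySem.Int.mod_eq_emod_of_pos (by norm_num : (0:Int) < 1575),
        pv_no_mod [2,3,4,5,6,7,8,9] (by decide) _ (by norm_num; omega)]
    norm_num [List.find?, h0, h1]
  by_cases h2 : x0 + 138 > 6150
  · rw [show (([0,1,2,3,4,5,6,7,8,9] : List Int)) = ([0,1] : List Int) ++ (2:Int) :: [3,4,5,6,7,8,9] from rfl,
        List.foldl_append,
        pv_no_mod [0,1] (by decide) x0 (by norm_num; omega),
        show (46:Int) * (([0,1] : List Int)).sum = 46 from by norm_num,
        List.foldl_cons,
        show pvStep (x0 + 46) 2 = PySem.Int.mod (x0 + 46 + 2 * 46) 1575 from by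
        unfold pvStep; rw [if_pos (by omega)],
        PySem.Int.mod_eq_emod_of_pos (by norm_num : (0:Int) < 1575),
        pv_no_mod [3,4,5,6,7,8,9] (by decide) _ (by norm_num; omega)]
    norm_num [List.find?, h0, h1, h2] <;> omega
  by_cases h3 : x0 + 276 > 6150
  · rw [show (([0,1,2,3,4,5,6,7,8,9] : List Int)) = ([0,1,2] : List Int) ++ (3:Int) :: [4,5,6,7,8,9] from rfl,
        List.foldl_append,
        pv_no_mod [0,1,2] (by decide) x0 (by norm_num; omega),
        show (46:Int) * (([0,1,2] : List Int)).sum = 138 from by norm_num,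
        List.foldl_cons,
        show pvStep (x0 + 138) 3 = PySem.Int.mod (x0 + 138 + 3 * 46) 1575 from by
        unfold pvStep; rw [if_pos (by omega)],
        PySem.Int.mod_eq_emod_of_pos (by norm_num : (0:Int) < 1575),
        pv_no_mod [4,5,6,7,8,9] (by decide) _ (by norm_num; omega)]
    norm_num [List.find?, h0, h1, h2, h3] <;> omega
  by_cases h4 : x0 + 460 > 6150
  · rw [show (([0,1,2,3,4,5,6,7,8,9] : List Int)) = ([0,1,2,3] : List Int) ++ (4:Int) :: [5,6,7,8,9] from rfl,
        List.foldl_append,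
        pv_no_mod [0,1,2,3] (by decide) x0 (by norm_num; omega),
        show (46:Int) * (([0,1,2,3] : List Int)).sum = 276 from by norm_num,
        List.foldl_cons,
        show pvStep (x0 + 276) 4 = PySem.Int.mod (x0 + 276 + 4 * 46) 1575 from by
        unfold pvStep; rw [if_pos (by omega)],
        PySem.Int.mod_eq_emod_of_pos (by norm_num : (0:Int) < 1575),
        pv_no_mod [5,6,7,8,9] (by decide) _ (by norm_num; omega)]
    norm_num [List.find?, h0, h1, h2, h3, h4] <;> omega
  by_cases h5 : x0 + 690 > 6150
  · rw [show (([0,1,2,3,4,5,6,7,8,9] : List Int)) = ([0,1,2,3,4] : List Int) ++ (5:Int) :: [6,7,8,9] from rfl,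
        List.foldl_append,
        pv_no_mod [0,1,2,3,4] (by decide) x0 (by norm_num; omega),
        show (46:Int) * (([0,1,2,3,4] : List Int)).sum = 460 from by norm_num,
        List.foldl_cons,
        show pvStep (x0 + 460) 5 = PySem.Int.mod (x0 + 460 + 5 * 46) 1575 from by
        unfold pvStep; rw [if_pos (by omega)],
        PySem.Int.mod_eq_emod_of_pos (by norm_num : (0:Int) < 1575),
        pv_no_mod [6,7,8,9] (by decide) _ (by norm_num; omega)]
    norm_num [List.find?, h0, h1, h2, h3, h4, h5] <;> omega
  by_cases h6 : x0 + 966 > 6150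
  · rw [show (([0,1,2,3,4,5,6,7,8,9] : List Int)) = ([0,1,2,3,4,5] : List Int) ++ (6:Int) :: [7,8,9] from rfl,
        List.foldl_append,
        pv_no_mod [0,1,2,3,4,5] (by decide) x0 (by norm_num; omega),
        show (46:Int) * (([0,1,2,3,4,5] : List Int)).sum = 690 from by norm_num,
        List.foldl_cons,
        show pvStep (x0 + 690) 6 = PySem.Int.mod (x0 + 690 + 6 * 46) 1575 from by
        unfold pvStep; rw [if_pos (by omega)],
        PySem.Int.mod_eq_emod_of_pos (by norm_num : (0:Int) < 1575),
        pv_no_mod [7,8,9] (by decide) _ (by norm_num; omega)]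
    norm_num [List.find?, h0, h1, h2, h3, h4, h5, h6] <;> omega
  by_cases h7 : x0 + 1288 > 6150
  · rw [show (([0,1,2,3,4,5,6,7,8,9] : List Int)) = ([0,1,2,3,4,5,6] : List Int) ++ (7:Int) :: [8,9] from rfl,
        List.foldl_append,
        pv_no_mod [0,1,2,3,4,5,6] (by decide) x0 (by norm_num; omega),
        show (46:Int) * (([0,1,2,3,4,5,6] : List Int)).sum = 966 from by norm_num,
        List.foldl_cons,
        show pvStep (x0 + 966) 7 = PySem.Int.mod (x0 + 966 + 7 * 46) 1575 from by
        unfold pvStep; rw [if_pos (by omega)],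
        PySem.Int.mod_eq_emod_of_pos (by norm_num : (0:Int) < 1575),
        pv_no_mod [8,9] (by decide) _ (by norm_num; omega)]
    norm_num [List.find?, h0, h1, h2, h3, h4, h5, h6, h7] <;> omega
  by_cases h8 : x0 + 1656 > 6150
  · rw [show (([0,1,2,3,4,5,6,7,8,9] : List Int)) = ([0,1,2,3,4,5,6,7] : List Int) ++ (8:Int) :: [9] from rfl,
        List.foldl_append,
        pv_no_mod [0,1,2,3,4,5,6,7] (by decide) x0 (by norm_num; omega),
        show (46:Int) * (([0,1,2,3,4,5,6,7] : List Int)).sum = 1288 from by norm_num,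
        List.foldl_cons,
        show pvStep (x0 + 1288) 8 = PySem.Int.mod (x0 + 1288 + 8 * 46) 1575 from by
        unfold pvStep; rw [if_pos (by omega)],
        PySem.Int.mod_eq_emod_of_pos (by norm_num : (0:Int) < 1575),
        pv_no_mod [9] (by decide) _ (by norm_num; omega)]
    norm_num [List.find?, h0, h1, h2, h3, h4, h5, h6, h7, h8] <;> omega
  by_cases h9 : x0 + 2070 > 6150
  · rw [show (([0,1,2,3,4,5,6,7,8,9] : List Int)) = ([0,1,2,3,4,5,6,7,8] : List Int) ++ (9:Int) :: [] from rfl,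
        List.foldl_append,
        pv_no_mod [0,1,2,3,4,5,6,7,8] (by decide) x0 (by norm_num; omega),
        show (46:Int) * (([0,1,2,3,4,5,6,7,8] : List Int)).sum = 1656 from by norm_num,
        List.foldl_cons,
        show pvStep (x0 + 1656) 9 = PySem.Int.mod (x0 + 1656 + 9 * 46) 1575 from by
        unfold pvStep; rw [if_pos (by omega)],
        PySem.Int.mod_eq_emod_of_pos (by norm_num : (0:Int) < 1575),
        pv_no_mod [] (by decide) _ (by norm_num; omega)]
    norm_num [List.find?, h0, h1, h2, h3, h4, h5, h6, h7, h8, h9] <;> omega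
  rw [pv_no_mod [0,1,2,3,4,5,6,7,8,9] (by decide) x0 (by norm_num; omega)]
  norm_num [List.find?, h0, h1, h2, h3, h4, h5, h6, h7, h8, h9]
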